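-- pv_equiv track=rewrite | github.com/SimonBure/artificial-evolution | rules.py | compute_sequence_fitness
-- ===== SOURCE A (Python) =====
-- def compute_sequence_fitness(sequence: str) -> int:
--     fitness = 0
--     penalty = 0
--
--     stored_1 = 0
--     ones_in_a_row = 0
--     stored_0 = 0
--     zeros_in_a_row = 0
--
--     for char in sequence:
--         if char == '1':
--             stored_1 += 1
--             ones_in_a_row += 1
--             zeros_in_a_row = 0
--
--             fitness += max(1, ones_in_a_row)
--         else:
--             stored_0 += 1
--             zeros_in_a_row += 1
--             ones_in_a_row = 0
--
--             fitness += min(0, - zeros_in_a_row)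
--
--     penalty = len(sequence)
--
--     # Big fitness bonus if sequence is a palindrome
--     if sequence == sequence[::-1]:
--         fitness += 10
--
--     return fitness - penalty
-- ===== SOURCE B (Python) =====
-- def compute_sequence_fitness(sequence: str) -> int:
--     # Run-based rewrite: each maximal run of k ones adds k*(k+1)//2,
--     # each maximal run of k non-ones subtracts k*(k+1)//2.
--     fitness = 0
--     i, n = 0, len(sequence)
--     while i < n:
--         is_one = sequence[i] == '1'
--         j = i
--         while j < n and (sequence[j] == '1') == is_one:
--             j += 1
--         k = j - i
--         t = k * (k + 1) // 2
--         fitness += t if is_one else -t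
--         i = j
--     if sequence == sequence[::-1]:
--         fitness += 10
--     return fitness - n
-- ===== Notes on version B (the rewrite author's own statement) =====
-- stated objective: faster
-- what changed: Replaces the per-character running counters (with dead stored_0/stored_1 bookkeeping) by grouping the string into maximal runs and adding/subtracting the closed-form triangular number k*(k+1)//2 per run.
import Mathlib
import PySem

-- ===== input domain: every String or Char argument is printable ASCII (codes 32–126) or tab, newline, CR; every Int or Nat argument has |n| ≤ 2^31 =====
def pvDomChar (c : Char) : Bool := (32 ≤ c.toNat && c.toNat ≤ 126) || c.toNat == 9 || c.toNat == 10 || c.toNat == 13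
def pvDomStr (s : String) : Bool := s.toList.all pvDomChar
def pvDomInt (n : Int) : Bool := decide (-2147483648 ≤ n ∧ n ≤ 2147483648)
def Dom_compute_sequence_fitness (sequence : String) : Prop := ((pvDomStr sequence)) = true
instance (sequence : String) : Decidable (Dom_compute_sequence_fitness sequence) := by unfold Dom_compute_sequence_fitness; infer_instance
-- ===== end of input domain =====

-- B replaces per-character counters by a per-run closed-form triangular sum (objective: simpler).

-- ===== PORT A =====
-- A's for-loop, state (fitness, stored_1, ones_in_a_row, stored_0, zeros_in_a_row); branch order as in A.
def pvLoopA : List Char → Int → Int → Int → Int → Int → Int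
  | [], fitness, _, _, _, _ => fitness
  | c :: rest, fitness, stored_1, ones, stored_0, zeros =>
    if c == '1' then
      pvLoopA rest (fitness + max 1 (ones + 1)) (stored_1 + 1) (ones + 1) stored_0 0
    else
      pvLoopA rest (fitness + min 0 (-(zeros + 1))) stored_1 0 (stored_0 + 1) (zeros + 1)

-- sequence == sequence[::-1] is ported as list reversal (exact: Python s[::-1] reverses the string)
def compute_sequence_fitness (sequence : String) : Int :=
  let fitness := pvLoopA sequence.toList 0 0 0 0 0
  let penalty : Int := sequence.toList.length
  let fitness := if sequence.toList = sequence.toList.reverse then fitness + 10 else fitness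
  fitness - penalty

-- ===== PORT B =====
-- B's outer while loop: each step consumes one maximal run (inner while = takeWhile/dropWhile)
def pvRunSum : List Char → Int
  | [] => 0
  | c :: rest =>
    let isOne := c == '1'
    let run := rest.takeWhile (fun d => (d == '1') == isOne)
    let k : Int := (run.length : Int) + 1
    let t : Int := k * (k + 1) / 2
    (if isOne then t else -t) + pvRunSum (rest.dropWhile (fun d => (d == '1') == isOne))
termination_by l => l.length
decreasing_by
  simpa using Nat.lt_succ_of_le (List.length_dropWhile_le _ _)

def compute_sequence_fitness_alt (sequence : String) : Int :=
  let fitness := pvRunSum sequence.toList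
  let fitness := if sequence.toList = sequence.toList.reverse then fitness + 10 else fitness
  fitness - sequence.toList.length

-- ===== PRECONDITION & SPEC =====
def Spec_compute_sequence_fitness (sequence : String) (out : Int) : Prop := out = compute_sequence_fitness_alt sequence
instance (sequence : String) (out : Int) : Decidable (Spec_compute_sequence_fitness sequence out) := by unfold Spec_compute_sequence_fitness; infer_instance

-- ===== CLAIM (what is proved, stated in full; the proofs are below) =====
def Claim_equal_compute_sequence_fitness : Prop := ∀ (sequence : String), Dom_compute_sequence_fitness sequence → Spec_compute_sequence_fitness sequence (compute_sequence_fitness sequence)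

-- ===== LEMMAS AND PROOFS =====

-- triangular numbers, recursively (proof helper)
def pvTri : Nat → Int
  | 0 => 0
  | n + 1 => pvTri n + ((n : Int) + 1)

lemma pvTri_eq (n : Nat) : pvTri n = (n : Int) * ((n : Int) + 1) / 2 := by
  induction n with
  | zero => rfl
  | succ n ih =>
    have hd : (2 : Int) ∣ (n : Int) * ((n : Int) + 1) := (Int.even_mul_succ_self (n : Int)).two_dvd
    have key : ∀ a b : Int, 2 ∣ a → b = a + 2 * ((n : Int) + 1) →
        a / 2 + ((n : Int) + 1) = b / 2 := by intro a b h1 h2; omega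
    have hr : ((n : Int) + 1) * (((n : Int) + 1) + 1) = (n : Int) * ((n : Int) + 1) + 2 * ((n : Int) + 1) := by ring
    have := key _ _ hd hr
    simp only [pvTri, ih]
    push_cast
    linarith [this]

-- processing a run of '1's of length t from ones-counter o ≥ 0 adds |t|*o + pvTri |t|
lemma pvLoopA_ones (t : List Char) (h : ∀ d ∈ t, d = '1') :
    ∀ (rest : List Char) (f s1 s0 o : Int), 0 ≤ o →
      pvLoopA (t ++ rest) f s1 o s0 0
        = pvLoopA rest (f + (t.length : Int) * o + pvTri t.length)
            (s1 + t.length) (o + t.length) s0 0 := by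
  induction t with
  | nil => intro rest f s1 s0 o _; simp [pvTri]
  | cons c t' ih =>
    intro rest f s1 s0 o ho
    have hc : c = '1' := h c (by simp)
    have ht' : ∀ d ∈ t', d = '1' := fun d hd => h d (by simp [hd])
    have hmax : max 1 (o + 1) = o + 1 := by omega
    simp only [List.cons_append, pvLoopA, hc, beq_self_eq_true, if_true, hmax]
    rw [ih ht' rest _ _ _ _ (by omega)]
    have hlen : ((t'.length + 1 : Nat) : Int) = (t'.length : Int) + 1 := by push_cast; ring
    have htri : pvTri (t'.length + 1) = pvTri t'.length + ((t'.length : Int) + 1) := rfl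
    congr 1
    · simp only [List.length_cons, hlen, htri]; ring
    · simp only [List.length_cons, hlen]; ring
    · simp only [List.length_cons, hlen]; ring

-- processing a run of non-'1's of length t from zeros-counter z ≥ 0 subtracts |t|*z + pvTri |t|
lemma pvLoopA_zeros (t : List Char) (h : ∀ d ∈ t, ¬ d = '1') :
    ∀ (rest : List Char) (f s1 s0 z : Int), 0 ≤ z →
      pvLoopA (t ++ rest) f s1 0 s0 z
        = pvLoopA rest (f - (t.length : Int) * z - pvTri t.length)
            s1 0 (s0 + t.length) (z + t.length) := by
  induction t with
  | nil => intro rest f s1 s0 z _; simp [pvTri]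
  | cons c t' ih =>
    intro rest f s1 s0 z hz
    have hc : ¬ c = '1' := h c (by simp)
    have ht' : ∀ d ∈ t', ¬ d = '1' := fun d hd => h d (by simp [hd])
    have hmin : min 0 (-(z + 1)) = -(z + 1) := by omega
    simp only [List.cons_append, pvLoopA, beq_iff_eq, hc, if_false, hmin]
    rw [ih ht' rest _ _ _ _ (by omega)]
    have hlen : ((t'.length + 1 : Nat) : Int) = (t'.length : Int) + 1 := by push_cast; ring
    have htri : pvTri (t'.length + 1) = pvTri t'.length + ((t'.length : Int) + 1) := rfl
    congr 1
    · simp only [List.length_cons, hlen, htri]; ring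
    · simp only [List.length_cons, hlen]; ring
    · simp only [List.length_cons, hlen]; ring

-- when the next char is not '1' (or the list is empty), the ones counter is irrelevant
lemma pvLoopA_ones_irrel (l : List Char) (hl : ∀ c ∈ l.head?, ¬ c = '1')
    (f s1 s0 o o' z : Int) : pvLoopA l f s1 o s0 z = pvLoopA l f s1 o' s0 z := by
  cases l with
  | nil => rfl
  | cons c rest =>
    have hc : ¬ c = '1' := hl c (by simp)
    simp [pvLoopA, hc]

-- when the next char is '1' (or the list is empty), the zeros counter is irrelevant
lemma pvLoopA_zeros_irrel (l : List Char) (hl : ∀ c ∈ l.head?, c = '1')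
    (f s1 s0 o z z' : Int) : pvLoopA l f s1 o s0 z = pvLoopA l f s1 o s0 z' := by
  cases l with
  | nil => rfl
  | cons c rest =>
    have hc : c = '1' := hl c (by simp)
    simp [pvLoopA, hc]

lemma pvLoopA_eq_runSum : ∀ (n : ℕ) (l : List Char), l.length ≤ n →
    ∀ (f s1 s0 : Int), pvLoopA l f s1 0 s0 0 = f + pvRunSum l := by
  intro n
  induction n with
  | zero =>
    intro l hl f s1 s0
    have : l = [] := List.eq_nil_of_length_eq_zero (Nat.le_zero.mp hl)
    subst this; simp [pvLoopA, pvRunSum]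
  | succ n ih =>
    intro l hl f s1 s0
    cases l with
    | nil => simp [pvLoopA, pvRunSum]
    | cons c rest =>
      by_cases hc : c = '1'
      · -- run of ones: c :: rest.takeWhile (· == '1')
        have hkey : (fun d => (d == '1') == (c == '1')) = (fun d => d == '1') := by
          funext d; simp [hc]
        have hsplit : c :: rest = (c :: rest.takeWhile (fun d => d == '1'))
            ++ rest.dropWhile (fun d => d == '1') := by
          simp [List.takeWhile_append_dropWhile]
        have hrun : ∀ d ∈ c :: rest.takeWhile (fun d => d == '1'), d = '1' := by
          intro d hd
          rcases List.mem_cons.mp hd with h | h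
          · simpa [hc] using h
          · simpa using List.mem_takeWhile_imp h
        have hdrop : ∀ d ∈ (rest.dropWhile (fun d => d == '1')).head?, ¬ d = '1' := by
          intro d hd
          have := List.head?_dropWhile_not (p := fun d => d == '1') rest
          intro h; rw [hd] at this; simp [h] at this
        have hlen : (rest.dropWhile (fun d => d == '1')).length ≤ n := by
          have h1 := List.length_dropWhile_le (fun d => d == '1') rest
          have h2 : rest.length + 1 ≤ n + 1 := hl
          omega
        conv_lhs => rw [hsplit]
        rw [pvLoopA_ones _ hrun _ _ _ _ _ le_rfl]
        rw [pvLoopA_ones_irrel _ hdrop _ _ _ _ 0]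
        rw [ih _ hlen]
        simp only [pvRunSum, hc, beq_self_eq_true, if_true, List.length_cons, pvTri_eq]
        have e1 : (fun d : Char => (d == '1') == true) = (fun d => d == '1') := by
          funext d; cases h : (d == '1') <;> rfl
        rw [e1]
        push_cast
        ring
      · -- run of non-ones
        have hcb0 : (c == '1') = false := by simp [hc]
        have hkey : (fun d => (d == '1') == (c == '1')) = (fun d => !(d == '1')) := by
          funext d; rw [hcb0]; cases h : (d == '1') <;> rfl
        have hsplit : c :: rest = (c :: rest.takeWhile (fun d => !(d == '1')))
            ++ rest.dropWhile (fun d => !(d == '1')) := by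
          simp [List.takeWhile_append_dropWhile]
        have hrun : ∀ d ∈ c :: rest.takeWhile (fun d => !(d == '1')), ¬ d = '1' := by
          intro d hd
          rcases List.mem_cons.mp hd with h | h
          · exact h ▸ hc
          · simpa using List.mem_takeWhile_imp h
        have hdrop : ∀ d ∈ (rest.dropWhile (fun d => !(d == '1'))).head?, d = '1' := by
          intro d hd
          have := List.head?_dropWhile_not (p := fun d => !(d == '1')) rest
          rw [hd] at this; simpa using this
        have hlen : (rest.dropWhile (fun d => !(d == '1'))).length ≤ n := by
          have h1 := List.length_dropWhile_le (fun d => !(d == '1')) rest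
          have h2 : rest.length + 1 ≤ n + 1 := hl
          omega
        conv_lhs => rw [hsplit]
        rw [pvLoopA_zeros _ hrun _ _ _ _ _ le_rfl]
        rw [pvLoopA_zeros_irrel _ hdrop _ _ _ _ _ 0]
        rw [ih _ hlen]
        have hcb : (c == '1') = false := by simp [hc]
        simp only [pvRunSum, hcb, List.length_cons, pvTri_eq, Bool.false_eq_true, if_false]
        have e2 : (fun d : Char => (d == '1') == false) = (fun d => !(d == '1')) := by
          funext d; cases h : (d == '1') <;> rfl
        rw [e2]
        push_cast
        ring

-- ===== VERDICT (by name: the statement is the Claim_ definition above) =====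
theorem compute_sequence_fitness_spec : Claim_equal_compute_sequence_fitness := by
  intro sequence _
  unfold Spec_compute_sequence_fitness compute_sequence_fitness compute_sequence_fitness_alt
  rw [pvLoopA_eq_runSum sequence.toList.length sequence.toList le_rfl]
  split <;> ring
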